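-- pv_equiv track=rewrite | github.com/zextras/carbonio-install-ansible | roles/pre_installation_checks/plugins/tests/fqdn_check.py | fqdn_strict
-- ===== SOURCE A (Python) =====
-- from typing import Any
--
-- def _is_ascii_alnum_or_hyphen(value: str) -> bool:
--     for char in value:
--         if not (char.isascii() and (char.isalnum() or char == "-")):
--             return False
--     return True
--
-- def _is_ascii_alpha(value: str) -> bool:
--     for char in value:
--         if not (char.isascii() and char.isalpha()):
--             return False
--     return True
--
-- def fqdn_strict(value: Any) -> bool:
--     if not isinstance(value, str):
--         return False
--
--     if not value:
--         return False
--
--     if value != value.strip():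
--         return False
--
--     if len(value) > 253:
--         return False
--
--     if "." not in value:
--         return False
--
--     labels = value.split(".")
--
--     if len(labels) < 2:
--         return False
--
--     for label in labels:
--         if not label:
--             return False
--
--         if len(label) > 63:
--             return False
--
--         if label[0] == "-" or label[-1] == "-":
--             return False
--
--         if not _is_ascii_alnum_or_hyphen(label):
--             return False
--
--     tld = labels[-1]
--
--     if len(tld) < 2:
--         return False
--
--     if not _is_ascii_alpha(tld):
--         return False
--
--     return True
-- ===== SOURCE B (Python) =====
-- from typing import Any
--
--
-- def _label_ok(label) -> bool:
--     return (
--         1 <= len(label) <= 63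
--         and label[0] != "-"
--         and label[-1] != "-"
--         and all(ch.isascii() and (ch.isalnum() or ch == "-") for ch in label)
--     )
--
--
-- def _tld_ok(label) -> bool:
--     return 2 <= len(label) <= 63 and all(ch.isascii() and ch.isalpha() for ch in label)
--
--
-- def fqdn_strict(value: Any) -> bool:
--     # Single pass over the characters: labels are collected on the fly,
--     # validated at each dot, the trailing label is validated as the TLD.
--     if not isinstance(value, str) or len(value) > 253:
--         return False
--     cur = []
--     dots = 0
--     for ch in value:
--         if ch == ".":
--             if not _label_ok(cur):
--                 return False
--             dots += 1
--             cur = []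
--         else:
--             cur.append(ch)
--     return dots >= 1 and _tld_ok(cur)
-- ===== Notes on version B (the rewrite author's own statement) =====
-- stated objective: alternative
-- what changed: B replaces A's strip/len/split-into-labels pipeline with a single left-to-right scan over the characters that accumulates each label and validates it at its dot, counting dots and validating the trailing label as the TLD (the strip and '.' in value checks become redundant and disappear).
import Mathlib
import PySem

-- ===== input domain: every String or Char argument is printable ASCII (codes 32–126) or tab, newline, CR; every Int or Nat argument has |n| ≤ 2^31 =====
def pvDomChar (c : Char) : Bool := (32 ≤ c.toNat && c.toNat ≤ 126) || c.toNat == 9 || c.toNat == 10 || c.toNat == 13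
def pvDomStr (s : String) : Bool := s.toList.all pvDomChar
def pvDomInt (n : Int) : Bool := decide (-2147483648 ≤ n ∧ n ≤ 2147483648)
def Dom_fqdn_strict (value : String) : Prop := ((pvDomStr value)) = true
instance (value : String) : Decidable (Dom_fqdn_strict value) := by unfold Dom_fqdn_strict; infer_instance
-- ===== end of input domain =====

-- B replaces A's strip/split-into-labels pipeline with a single left-to-right scan that
-- collects and validates each label at its dot (objective: alternative single-pass algorithm).

-- ===== PORT A =====
-- _is_ascii_alnum_or_hyphen: per-char loop with early return; char.isascii() is c.toNat ≤ 127
def pvIsAsciiAlnumOrHyphen : List Char → Bool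
  | [] => true
  | c :: rest =>
    if !(decide (c.toNat ≤ 127) && (PySem.Chars.isalnum c || c == '-')) then false
    else pvIsAsciiAlnumOrHyphen rest

-- _is_ascii_alpha
def pvIsAsciiAlpha : List Char → Bool
  | [] => true
  | c :: rest =>
    if !(decide (c.toNat ≤ 127) && PySem.Chars.isalpha c) then false
    else pvIsAsciiAlpha rest

-- the 'for label in labels' loop with its early returns
def pvCheckLabels : List (List Char) → Bool
  | [] => true
  | lab :: rest =>
    match lab with
    | [] => false                                   -- 'if not label: return False'
    | c :: cs =>
      if 63 < (c :: cs).length then false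
      else if c == '-' || (c :: cs).getLastD ' ' == '-' then false  -- label[0], label[-1]: label nonempty here, default unused
      else if !pvIsAsciiAlnumOrHyphen (c :: cs) then false
      else pvCheckLabels rest

def fqdn_strict (value : String) : Bool :=
  let l := value.toList
  if l.isEmpty then false                           -- 'if not value'
  else if !(l == PySem.Chars.strip l) then false    -- 'if value != value.strip()'
  else if 253 < l.length then false
  else if !PySem.Chars.isIn ['.'] l then false      -- '"." not in value'
  else
    let labels := PySem.Chars.splitOn l ['.']       -- value.split(".")
    if labels.length < 2 then false
    else if !pvCheckLabels labels then false
    else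
      let tld := labels.getLastD []                 -- labels[-1]: split never returns [], default unused
      if tld.length < 2 then false
      else if !pvIsAsciiAlpha tld then false
      else true

-- ===== PORT B =====
-- _label_ok (the 'and' chain short-circuits, so label[0]/label[-1] are only read on a nonempty label: defaults unused)
def pvLabelOk (label : List Char) : Bool :=
  decide (1 ≤ label.length) && decide (label.length ≤ 63)
  && !(label.headD ' ' == '-') && !(label.getLastD ' ' == '-')
  && label.all (fun c => decide (c.toNat ≤ 127) && (PySem.Chars.isalnum c || c == '-'))

-- _tld_ok
def pvTldOk (label : List Char) : Bool :=
  decide (2 ≤ label.length) && decide (label.length ≤ 63)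
  && label.all (fun c => decide (c.toNat ≤ 127) && PySem.Chars.isalpha c)

-- the 'for ch in value' loop: state = (current label, dots seen)
def pvScan : List Char → List Char → Nat → Bool
  | [], cur, dots => decide (1 ≤ dots) && pvTldOk cur
  | c :: rest, cur, dots =>
    if c == '.' then
      if !pvLabelOk cur then false
      else pvScan rest [] (dots + 1)
    else pvScan rest (cur ++ [c]) dots

def fqdn_strict_alt (value : String) : Bool :=
  if 253 < value.toList.length then false
  else pvScan value.toList [] 0

-- ===== PRECONDITION & SPEC =====
def Spec_fqdn_strict (value : String) (out : Bool) : Prop := out = fqdn_strict_alt value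
instance (value : String) (out : Bool) : Decidable (Spec_fqdn_strict value out) := by unfold Spec_fqdn_strict; infer_instance

-- ===== CLAIM (what is proved, stated in full; the proofs are below) =====
def Claim_equal_fqdn_strict : Prop := ∀ (value : String), Dom_fqdn_strict value → Spec_fqdn_strict value (fqdn_strict value)

-- ===== LEMMAS AND PROOFS =====

-- the label decomposition both programs induce on the character list
def pvConsHead (a : List Char) : List (List Char) → List (List Char)
  | [] => [a]
  | s :: rest => (a ++ s) :: rest

def pvLabels : List Char → List (List Char)
  | [] => [[]]
  | c :: t => if c = '.' then [] :: pvLabels t else pvConsHead [c] (pvLabels t)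

-- what pvScan computes on a fully decomposed list
def pvChk : List (List Char) → Nat → Bool
  | [], _ => true
  | [s], dots => decide (1 ≤ dots) && pvTldOk s
  | s :: rest, dots => pvLabelOk s && pvChk rest (dots + 1)

lemma pvLabels_ne_nil (l : List Char) : pvLabels l ≠ [] := by
  cases l with
  | nil => simp [pvLabels]
  | cons c t =>
    simp only [pvLabels]
    split
    · simp
    · cases h : pvLabels t <;> simp [pvConsHead]

lemma pvConsHead_nil_of_ne {xs : List (List Char)} (h : xs ≠ []) : pvConsHead [] xs = xs := by
  cases xs with
  | nil => exact absurd rfl h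
  | cons s r => simp [pvConsHead]

lemma pvConsHead_consHead (a b : List Char) (xs : List (List Char)) :
    pvConsHead a (pvConsHead b xs) = pvConsHead (a ++ b) xs := by
  cases xs <;> simp [pvConsHead]

lemma pvGo_eq : ∀ (fuel : Nat) (l cur : List Char) (acc : List (List Char)), l.length < fuel →
    PySem.Chars.splitOn.go ['.'] fuel l cur acc = acc.reverse ++ pvConsHead cur.reverse (pvLabels l) := by
  intro fuel
  induction fuel with
  | zero => intro l cur acc h; omega
  | succ n ih =>
    intro l cur acc h
    cases l with
    | nil => simp [PySem.Chars.splitOn.go, pvLabels, pvConsHead]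
    | cons c rest =>
      by_cases hc : c = '.'
      · subst hc
        rw [show PySem.Chars.splitOn.go ['.'] (n+1) ('.' :: rest) cur acc
              = PySem.Chars.splitOn.go ['.'] n rest [] (cur.reverse :: acc) by
            simp [PySem.Chars.splitOn.go]]
        rw [ih rest [] (cur.reverse :: acc) (by simpa using Nat.lt_of_succ_lt_succ h)]
        cases hs : pvLabels rest with
        | nil => exact absurd hs (pvLabels_ne_nil rest)
        | cons s r => simp [pvLabels, hs, pvConsHead]
      · rw [show PySem.Chars.splitOn.go ['.'] (n+1) (c :: rest) cur acc
              = PySem.Chars.splitOn.go ['.'] n rest (c :: cur) acc by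
            simp [PySem.Chars.splitOn.go, List.isPrefixOf, Ne.symm hc]]
        rw [ih rest (c :: cur) acc (by simpa using Nat.lt_of_succ_lt_succ h)]
        simp [pvLabels, hc, pvConsHead_consHead]

lemma pvSplitOn_eq (l : List Char) : PySem.Chars.splitOn l ['.'] = pvLabels l := by
  rw [PySem.Chars.splitOn, pvGo_eq (l.length + 1) l [] [] (Nat.lt_succ_self _)]
  simp [pvConsHead_nil_of_ne (pvLabels_ne_nil l)]

lemma pvScan_eq : ∀ (l cur : List Char) (dots : Nat),
    pvScan l cur dots = pvChk (pvConsHead cur (pvLabels l)) dots := by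
  intro l
  induction l with
  | nil => intro cur dots; simp [pvScan, pvLabels, pvConsHead, pvChk]
  | cons c t ih =>
    intro cur dots
    by_cases hc : c = '.'
    · subst hc
      obtain ⟨s, r, hs⟩ : ∃ s r, pvLabels t = s :: r := by
        cases h : pvLabels t with
        | nil => exact absurd h (pvLabels_ne_nil t)
        | cons s r => exact ⟨s, r, rfl⟩
      simp only [pvScan, pvLabels, beq_self_eq_true, if_true]
      rw [ih [] (dots + 1), pvConsHead_nil_of_ne (pvLabels_ne_nil t), hs]
      simp only [pvConsHead, List.append_nil, pvChk]
      cases pvLabelOk cur <;> simp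
    · simp only [pvScan, pvLabels, beq_iff_eq, if_neg hc]
      rw [ih (cur ++ [c]) dots, pvConsHead_consHead]

lemma pvChk_eq : ∀ (ls : List (List Char)) (dots : Nat), ls ≠ [] →
    pvChk ls dots = (ls.dropLast.all pvLabelOk && pvTldOk (ls.getLastD [])
      && decide (2 ≤ dots + ls.length)) := by
  intro ls
  induction ls with
  | nil => intro dots h; exact absurd rfl h
  | cons s r ih =>
    intro dots _
    cases r with
    | nil =>
      show (decide (1 ≤ dots) && pvTldOk s)
          = ([s].dropLast.all pvLabelOk && pvTldOk s && decide (2 ≤ dots + [s].length))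
      have : decide (2 ≤ dots + [s].length) = decide (1 ≤ dots) := by
        rw [decide_eq_decide]; simp
      rw [this]
      cases pvTldOk s <;> cases hd : decide (1 ≤ dots) <;> simp
    | cons s2 r2 =>
      rw [show pvChk (s :: s2 :: r2) dots = (pvLabelOk s && pvChk (s2 :: r2) (dots + 1)) from rfl]
      rw [ih (dots + 1) (by simp)]
      have hlen : decide (2 ≤ dots + 1 + (s2 :: r2).length)
          = decide (2 ≤ dots + (s :: s2 :: r2).length) := by
        rw [decide_eq_decide]; simp; omega
      rw [hlen]
      simp [Bool.and_assoc]

lemma pvIsAsciiAlnumOrHyphen_eq_all (l : List Char) :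
    pvIsAsciiAlnumOrHyphen l
      = l.all (fun c => decide (c.toNat ≤ 127) && (PySem.Chars.isalnum c || c == '-')) := by
  induction l with
  | nil => rfl
  | cons c t ih =>
    simp only [pvIsAsciiAlnumOrHyphen, List.all_cons, ← ih]
    cases h : (decide (c.toNat ≤ 127) && (PySem.Chars.isalnum c || c == '-')) <;> simp

lemma pvIsAsciiAlpha_eq_all (l : List Char) :
    pvIsAsciiAlpha l = l.all (fun c => decide (c.toNat ≤ 127) && PySem.Chars.isalpha c) := by
  induction l with
  | nil => rfl
  | cons c t ih =>
    simp only [pvIsAsciiAlpha, List.all_cons, ← ih]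
    cases h : (decide (c.toNat ≤ 127) && PySem.Chars.isalpha c) <;> simp

lemma pvLabelOk_cons (c : Char) (cs : List Char) : pvLabelOk (c :: cs)
    = (decide ((c :: cs).length ≤ 63) && !(c == '-') && !((c :: cs).getLastD ' ' == '-')
       && (c :: cs).all (fun c => decide (c.toNat ≤ 127) && (PySem.Chars.isalnum c || c == '-'))) := by
  simp [pvLabelOk]

lemma pvCheckLabels_eq_all (ls : List (List Char)) : pvCheckLabels ls = ls.all pvLabelOk := by
  induction ls with
  | nil => rfl
  | cons lab rest ih =>
    cases lab with
    | nil => simp [pvCheckLabels, pvLabelOk]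
    | cons c cs =>
      simp only [pvCheckLabels, List.all_cons, ← ih, pvIsAsciiAlnumOrHyphen_eq_all]
      by_cases h1 : 63 < (c :: cs).length
      · rw [if_pos h1]
        rw [pvLabelOk_cons, decide_eq_false (Nat.not_le.mpr h1)]
        simp
      · rw [if_neg h1]
        by_cases h2 : (c == '-' || (c :: cs).getLastD ' ' == '-') = true
        · rw [if_pos h2]
          rcases (show c = '-' ∨ (c :: cs).getLastD ' ' = '-' by simpa using h2) with h | h
          · subst h; rw [pvLabelOk_cons]; simp
          · rw [pvLabelOk_cons, h]; simp
        · rw [if_neg h2]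
          have h2' : c ≠ '-' ∧ (c :: cs).getLastD ' ' ≠ '-' := by simpa [not_or] using h2
          by_cases h3 : (decide (c.toNat ≤ 127) && (PySem.Chars.isalnum c || c == '-')
              && cs.all (fun c => decide (c.toNat ≤ 127) && (PySem.Chars.isalnum c || c == '-'))) = true
          · rw [if_neg (by rw [h3]; simp)]
            rw [pvLabelOk_cons, decide_eq_true (Nat.not_lt.mp h1), List.all_cons, h3]
            have hc' : (c == '-') = false := by simpa using h2'.1
            have hl' : ((c :: cs).getLastD ' ' == '-') = false := by simpa using h2'.2
            rw [hc', hl', ih]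
            simp
          · have h3' : (decide (c.toNat ≤ 127) && (PySem.Chars.isalnum c || c == '-')
                && cs.all (fun c => decide (c.toNat ≤ 127) && (PySem.Chars.isalnum c || c == '-'))) = false :=
              Bool.eq_false_iff.mpr h3
            rw [if_pos (by rw [h3']; simp)]
            rw [pvLabelOk_cons, List.all_cons, h3']
            simp

-- character-class facts
lemma pvAlnumHyph_not_space (c : Char) (h : (PySem.Chars.isalnum c || c == '-') = true) :
    PySem.Chars.isspace c = false := by
  simp [PySem.Chars.isalnum, PySem.Chars.isalpha, PySem.Chars.isupper, PySem.Chars.islower,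
    PySem.Chars.isdigit, Char.le_def, UInt32.le_iff_toNat_le] at h
  have hv : c.toNat = c.val.toNat := rfl
  rcases h with ((h | h) | h) | h
  · simp [PySem.Chars.isspace]; omega
  · simp [PySem.Chars.isspace]; omega
  · simp [PySem.Chars.isspace]; omega
  · subst h; decide

lemma pvAlpha_ne_hyph (c : Char) (h : PySem.Chars.isalpha c = true) : (c == '-') = false := by
  simp only [beq_eq_false_iff_ne, ne_eq]
  intro hh
  subst hh
  exact absurd h (by decide)

lemma pvAlpha_alnumHyph (c : Char) (h : (decide (c.toNat ≤ 127) && PySem.Chars.isalpha c) = true) :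
    (decide (c.toNat ≤ 127) && (PySem.Chars.isalnum c || c == '-')) = true := by
  simp only [Bool.and_eq_true] at h ⊢
  exact ⟨h.1, by simp [PySem.Chars.isalnum, h.2]⟩

-- generic list facts specialised to our use
lemma pvAll_decomp (p : List Char → Bool) (ls : List (List Char)) (h : ls ≠ []) :
    ls.all p = (ls.dropLast.all p && p (ls.getLastD [])) := by
  conv_lhs => rw [← List.dropLast_append_getLast h]
  simp [List.getLastD_eq_getLast?, List.getLast?_eq_some_getLast h]

lemma pvGetLastD_mem {α : Type} (d : α) (l : List α) (h : l ≠ []) : l.getLastD d ∈ l := by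
  rw [List.getLastD_eq_getLast?, List.getLast?_eq_some_getLast h]
  exact List.getLast_mem h

lemma pvHeadD_mem {α : Type} (d : α) (l : List α) (h : l ≠ []) : l.headD d ∈ l := by
  cases l with
  | nil => exact absurd rfl h
  | cons a t => simp

lemma pvStrip_eq_self (l : List Char) (h : ∀ c ∈ l, PySem.Chars.isspace c = false) :
    PySem.Chars.strip l = l := by
  have h1 : List.dropWhile PySem.Chars.isspace l = l :=
    List.dropWhile_eq_self_iff.mpr (by
      cases l with
      | nil => simp
      | cons a t => simp [h a (by simp)])
  have h2 : List.dropWhile PySem.Chars.isspace l.reverse = l.reverse :=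
    List.dropWhile_eq_self_iff.mpr (by
      cases hr : l.reverse with
      | nil => simp
      | cons a t =>
        have ha : a ∈ l := List.mem_reverse.mp (hr ▸ List.mem_cons_self)
        simp [h a ha])
  rw [PySem.Chars.strip, PySem.Chars.lstrip, PySem.Chars.rstrip, h1, h2, List.reverse_reverse]

lemma pvConsHead_length (a : List Char) (xs : List (List Char)) (h : xs ≠ []) :
    (pvConsHead a xs).length = xs.length := by
  cases xs with
  | nil => exact absurd rfl h
  | cons s r => simp [pvConsHead]

lemma pvTwo_le_pvLabels_iff (l : List Char) : 2 ≤ (pvLabels l).length ↔ '.' ∈ l := by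
  induction l with
  | nil => simp [pvLabels]
  | cons c t ih =>
    by_cases hc : c = '.'
    · subst hc
      rw [pvLabels, if_pos rfl]
      simp only [List.length_cons, List.mem_cons, true_or, iff_true]
      have := List.length_pos_iff.mpr (pvLabels_ne_nil t)
      omega
    · rw [pvLabels, if_neg hc, pvConsHead_length _ _ (pvLabels_ne_nil t)]
      rw [ih]
      simp [Ne.symm hc]

lemma pvMem_pvLabels (l : List Char) (c : Char) (h : c ∈ l) :
    c = '.' ∨ ∃ s ∈ pvLabels l, c ∈ s := by
  induction l with
  | nil => simp at h
  | cons a t ih =>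
    by_cases ha : a = '.'
    · subst ha
      rcases List.mem_cons.mp h with rfl | h2
      · exact Or.inl rfl
      · rcases ih h2 with h3 | ⟨s, hs, hcs⟩
        · exact Or.inl h3
        · exact Or.inr ⟨s, by simp [pvLabels, hs], hcs⟩
    · rw [pvLabels, if_neg ha]
      obtain ⟨s0, r0, hs0⟩ : ∃ s0 r0, pvLabels t = s0 :: r0 := by
        cases hx : pvLabels t with
        | nil => exact absurd hx (pvLabels_ne_nil t)
        | cons s0 r0 => exact ⟨s0, r0, rfl⟩
      rw [hs0]
      rcases List.mem_cons.mp h with rfl | h2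
      · exact Or.inr ⟨c :: s0, by simp [pvConsHead], by simp⟩
      · rcases ih h2 with h3 | ⟨s, hs, hcs⟩
        · exact Or.inl h3
        · rw [hs0] at hs
          rcases List.mem_cons.mp hs with rfl | hs2
          · exact Or.inr ⟨a :: s, by simp [pvConsHead], by simp [hcs]⟩
          · exact Or.inr ⟨s, by simp [pvConsHead, hs2], hcs⟩

lemma pvLabelOk_le63 (t : List Char) (h : pvLabelOk t = true) : t.length ≤ 63 := by
  simp only [pvLabelOk, Bool.and_eq_true, decide_eq_true_eq] at h
  exact h.1.1.1.2

lemma pvLabelOk_chars (t : List Char) (h : pvLabelOk t = true) :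
    ∀ c ∈ t, (decide (c.toNat ≤ 127) && (PySem.Chars.isalnum c || c == '-')) = true := by
  simp only [pvLabelOk, Bool.and_eq_true] at h
  exact fun c hc => List.all_eq_true.mp h.2 c hc

lemma pvTldOk_labelOk (t : List Char) (h : pvTldOk t = true) : pvLabelOk t = true := by
  simp only [pvTldOk, Bool.and_eq_true, decide_eq_true_eq] at h
  obtain ⟨⟨h2, h63⟩, halpha⟩ := h
  have hne : t ≠ [] := by intro he; rw [he] at h2; simp at h2
  have hmemalpha : ∀ c ∈ t, PySem.Chars.isalpha c = true := by
    intro c hc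
    have hx := List.all_eq_true.mp halpha c hc
    simp only [Bool.and_eq_true] at hx
    exact hx.2
  simp only [pvLabelOk, Bool.and_eq_true, decide_eq_true_eq]
  refine ⟨⟨⟨⟨by omega, h63⟩, ?_⟩, ?_⟩, ?_⟩
  · simp only [Bool.not_eq_eq_eq_not, Bool.not_true]
    exact pvAlpha_ne_hyph _ (hmemalpha _ (pvHeadD_mem ' ' t hne))
  · simp only [Bool.not_eq_eq_eq_not, Bool.not_true]
    exact pvAlpha_ne_hyph _ (hmemalpha _ (pvGetLastD_mem ' ' t hne))
  · exact List.all_eq_true.mpr fun c hc =>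
      pvAlpha_alnumHyph c (List.all_eq_true.mp halpha c hc)

-- Boolean characterisations of the two ports
lemma pvB_iff (v : String) : fqdn_strict_alt v = true ↔
    (v.toList.length ≤ 253 ∧ (pvLabels v.toList).dropLast.all pvLabelOk = true ∧
     pvTldOk ((pvLabels v.toList).getLastD []) = true ∧ 2 ≤ (pvLabels v.toList).length) := by
  unfold fqdn_strict_alt
  rw [pvScan_eq, pvConsHead_nil_of_ne (pvLabels_ne_nil v.toList),
    pvChk_eq _ 0 (pvLabels_ne_nil v.toList)]
  split_ifs with h
  · simp only [false_iff, not_and]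
    intro h1
    omega
  · simp only [Bool.and_eq_true, decide_eq_true_eq]
    constructor
    · rintro ⟨⟨ha, hb⟩, hc⟩
      exact ⟨Nat.not_lt.mp h, ha, hb, by omega⟩
    · rintro ⟨-, ha, hb, hc⟩
      exact ⟨⟨ha, hb⟩, by omega⟩

lemma pvA_iff (v : String) : fqdn_strict v = true ↔
    (v.toList ≠ [] ∧ PySem.Chars.strip v.toList = v.toList ∧ v.toList.length ≤ 253 ∧
     '.' ∈ v.toList ∧ 2 ≤ (pvLabels v.toList).length ∧
     (pvLabels v.toList).all pvLabelOk = true ∧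
     2 ≤ ((pvLabels v.toList).getLastD []).length ∧
     ((pvLabels v.toList).getLastD []).all
       (fun c => decide (c.toNat ≤ 127) && PySem.Chars.isalpha c) = true) := by
  simp only [fqdn_strict]
  rw [pvSplitOn_eq, pvCheckLabels_eq_all, pvIsAsciiAlpha_eq_all]
  constructor
  · intro h
    split_ifs at h with h1 h2 h3 h4 h5 h6 h7 h8
    all_goals simp at h
    refine ⟨fun he => h1 (by simp [he]), ?_, Nat.not_lt.mp h3, ?_, Nat.not_lt.mp h5,
      by simpa using h6, Nat.not_lt.mp h7, by simpa using h8⟩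
    · have h2' : v.toList = PySem.Chars.strip v.toList := by simpa using h2
      exact h2'.symm
    · have h4' : PySem.Chars.isIn ['.'] v.toList = true := by simpa using h4
      rw [PySem.Chars.isIn_iff_infix, List.singleton_infix_iff] at h4'
      exact h4'
  · rintro ⟨hne, hstrip, hlen, hdot, hnl, hall, htl, halpha⟩
    rw [if_neg (by simp [hne]),
      if_neg (by simp [hstrip]),
      if_neg (Nat.not_lt.mpr hlen),
      if_neg (by simp [PySem.Chars.isIn_iff_infix, List.singleton_infix_iff, hdot]),
      if_neg (Nat.not_lt.mpr hnl),
      if_neg (by rw [hall]; simp),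
      if_neg (Nat.not_lt.mpr htl),
      if_neg (by rw [halpha]; simp)]

-- ===== VERDICT (by name: the statement is the Claim_ definition above) =====
theorem fqdn_strict_spec : Claim_equal_fqdn_strict := by
  intro v _
  unfold Spec_fqdn_strict
  rw [Bool.eq_iff_iff, pvA_iff, pvB_iff]
  constructor
  · rintro ⟨hne, hstrip, hlen, hdot, hnl, hall, htld2, halpha⟩
    have hmem := pvGetLastD_mem [] (pvLabels v.toList) (pvLabels_ne_nil v.toList)
    have hok : pvLabelOk ((pvLabels v.toList).getLastD []) = true :=
      List.all_eq_true.mp hall _ hmem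
    refine ⟨hlen, ?_, ?_, hnl⟩
    · rw [pvAll_decomp _ _ (pvLabels_ne_nil v.toList)] at hall
      simp only [Bool.and_eq_true] at hall
      exact hall.1
    · simp only [pvTldOk, Bool.and_eq_true, decide_eq_true_eq]
      exact ⟨⟨htld2, pvLabelOk_le63 _ hok⟩, halpha⟩
  · rintro ⟨hlen, hdrop, htld, hnl⟩
    have htlab : pvLabelOk ((pvLabels v.toList).getLastD []) = true := pvTldOk_labelOk _ htld
    have hall : (pvLabels v.toList).all pvLabelOk = true := by
      rw [pvAll_decomp _ _ (pvLabels_ne_nil v.toList), hdrop, htlab]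
      rfl
    have hdot : '.' ∈ v.toList := (pvTwo_le_pvLabels_iff v.toList).mp hnl
    have hne : v.toList ≠ [] := by
      intro he
      rw [he] at hdot
      simp at hdot
    simp only [pvTldOk, Bool.and_eq_true, decide_eq_true_eq] at htld
    obtain ⟨⟨ht2, ht63⟩, htalpha⟩ := htld
    have hnospace : ∀ c ∈ v.toList, PySem.Chars.isspace c = false := by
      intro c hc
      rcases pvMem_pvLabels v.toList c hc with rfl | ⟨s, hs, hcs⟩
      · decide
      · have hsok : pvLabelOk s = true := List.all_eq_true.mp hall s hs
        have hx := pvLabelOk_chars s hsok c hcs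
        simp only [Bool.and_eq_true] at hx
        exact pvAlnumHyph_not_space c hx.2
    exact ⟨hne, pvStrip_eq_self _ hnospace, hlen, hdot, hnl, hall, ht2, htalpha⟩
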